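-- pv_equiv track=rewrite | github.com/Reinstaal/IT-class | 2nd-semester/verification-digit.py | verifyOld
-- ===== SOURCE A (Python) =====
-- def verifyOld(barcode):
--     verificationDigit = 0
--     for i, digit in enumerate(barcode, 1):
--         if i%2 == 0:
--             verificationDigit += digit*3
--         else:
--             verificationDigit += digit
--     return verificationDigit%10
-- ===== SOURCE B (Python) =====
-- def verifyOld(barcode):
--     # Staged reductions instead of a loop: total digit sum plus twice the sum
--     # of the even-index (0-based) odd positions, taken by a stride-2 slice.
--     return (sum(barcode) + 2 * sum(barcode[1::2])) % 10
-- ===== Notes on version B (the rewrite author's own statement) =====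
-- stated objective: simpler
-- what changed: Replaces the enumerate loop with its per-element parity branch by two stride-based whole-list reductions: sum(barcode) plus a 2x correction on the [1::2] slice, then mod 10.
import Mathlib
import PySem

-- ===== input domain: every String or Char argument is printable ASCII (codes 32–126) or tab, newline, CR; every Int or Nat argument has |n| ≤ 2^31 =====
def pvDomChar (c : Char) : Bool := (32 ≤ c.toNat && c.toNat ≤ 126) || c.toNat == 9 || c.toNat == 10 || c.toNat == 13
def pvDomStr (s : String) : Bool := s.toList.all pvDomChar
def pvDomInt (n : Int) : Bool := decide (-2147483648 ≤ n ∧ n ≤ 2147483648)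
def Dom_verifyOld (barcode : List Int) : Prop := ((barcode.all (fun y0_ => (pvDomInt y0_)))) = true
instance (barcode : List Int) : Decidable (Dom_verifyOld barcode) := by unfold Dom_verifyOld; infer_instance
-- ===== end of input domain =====

-- ===== PORT A =====
def verifyOld (barcode : List Int) : Int :=
  let v := (PySem.List.enumerate barcode 1).foldl
    (fun acc p => if PySem.Int.mod p.1 2 = 0 then acc + p.2 * 3 else acc + p.2) 0
  PySem.Int.mod v 10

-- ===== PORT B =====
-- B: (sum(barcode) + 2 * sum(barcode[1::2])) % 10 — two whole-list reductions, no loop branch.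
-- slice? with step 2 ≠ 0 always returns some; .getD [] only discharges the Option.
def verifyOld_alt (barcode : List Int) : Int :=
  PySem.Int.mod (barcode.sum + 2 * ((PySem.List.slice? barcode (some 1) none 2).getD []).sum) 10

-- ===== PRECONDITION & SPEC =====
def Spec_verifyOld (barcode : List Int) (out : Int) : Prop := out = verifyOld_alt barcode
instance (barcode : List Int) (out : Int) : Decidable (Spec_verifyOld barcode out) := by unfold Spec_verifyOld; infer_instance

-- ===== CLAIM (what is proved, stated in full; the proofs are below) =====
def Claim_equal_verifyOld : Prop := ∀ (barcode : List Int), Dom_verifyOld barcode → Spec_verifyOld barcode (verifyOld barcode)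

-- ===== LEMMAS AND PROOFS =====

/-- The elements at odd 0-based indices (what Python's `barcode[1::2]` selects). -/
def oddIdx : List Int → List Int
  | [] => []
  | [_] => []
  | _ :: y :: r => y :: oddIdx r

lemma range_filterMap_odd : ∀ (xs : List Int),
    (List.range (xs.length / 2)).filterMap (fun k : Nat => xs[((1:Int) + 2*(k:Int)).toNat]?) = oddIdx xs := by
  intro xs
  induction xs using oddIdx.induct with
  | case1 => simp [oddIdx]
  | case2 x => simp [oddIdx]
  | case3 x y r ih =>
      have hlen : (x :: y :: r).length / 2 = r.length / 2 + 1 := by simp; omega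
      rw [hlen, List.range_succ_eq_map, List.filterMap_cons, List.filterMap_map]
      have hfun : ((fun k : Nat => (x :: y :: r)[((1:Int) + 2*(k:Int)).toNat]?) ∘ Nat.succ)
          = fun k : Nat => r[((1:Int) + 2*(k:Int)).toNat]? := by
        funext k
        have h2 : (((1:Int) + 2*((Nat.succ k : Nat):Int)).toNat) = ((1:Int) + 2*(k:Int)).toNat + 2 := by
          push_cast; omega
        rw [Function.comp_apply, h2]
        rfl
      rw [hfun, ih]
      have h0 : (((1:Int) + 2*((0:Nat):Int)).toNat) = 1 := by norm_num
      rw [h0]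
      rfl

lemma slice_odd (xs : List Int) :
    PySem.List.slice? xs (some 1) none 2 = some (oddIdx xs) := by
  rw [PySem.List.slice?, PySem.List.sliceIndices]
  norm_num
  rcases xs with _ | ⟨x, rest⟩
  · simp [oddIdx]
  · have hmin : min (1:Int) ((x :: rest).length : Int) = 1 := by
      simp
    rw [hmin]
    have hcount : (if 1 < (x :: rest).length then ((((x :: rest).length : Int) - 1 + 2 - 1) / 2).toNat else 0)
        = (x :: rest).length / 2 := by
      split_ifs with h
      · have : (((x :: rest).length : Int) - 1 + 2 - 1) = ((x :: rest).length : Int) := by ring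
        rw [this]
        omega
      · have : (x :: rest).length = 1 := by omega
        simp [this]
    rw [hcount]
    rw [range_filterMap_odd]

/-- A's enumerate-from-s fold (odd s) equals sum + 2 * (odd-index sum). -/
lemma foldA_eq : ∀ (xs : List Int) (s t : Int), s % 2 = 1 →
    (PySem.List.enumerate xs s).foldl
      (fun acc p => if PySem.Int.mod p.1 2 = 0 then acc + p.2 * 3 else acc + p.2) t
      = t + xs.sum + 2 * (oddIdx xs).sum := by
  intro xs
  induction xs using oddIdx.induct with
  | case1 => intro s t _; simp [oddIdx]
  | case2 x =>
      intro s t hs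
      simp [PySem.List.enumerate_cons, PySem.List.enumerate_nil, oddIdx, hs]
  | case3 x y rest ih =>
      intro s t hs
      have h1 : PySem.Int.mod s 2 = s % 2 := PySem.Int.mod_eq_emod_of_pos (by norm_num)
      have h2 : PySem.Int.mod (s + 1) 2 = (s + 1) % 2 := PySem.Int.mod_eq_emod_of_pos (by norm_num)
      have hc1 : ¬ (PySem.Int.mod s 2 = 0) := by rw [h1]; omega
      have hc2 : PySem.Int.mod (s + 1) 2 = 0 := by rw [h2]; omega
      simp only [PySem.List.enumerate_cons, List.foldl_cons, if_neg hc1, if_pos hc2]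
      rw [ih (s + 1 + 1) _ (by omega)]
      simp [oddIdx]; ring

-- ===== VERDICT (by name: the statement is the Claim_ definition above) =====
theorem verifyOld_spec : Claim_equal_verifyOld := by
  intro barcode _
  unfold Spec_verifyOld verifyOld verifyOld_alt
  rw [slice_odd, foldA_eq barcode 1 0 (by decide)]
  norm_num
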